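-- pv_equiv track=rewrite | github.com/kalashkovpaul/bmstu-modeling | 7-term/lab03/src/twist_generator.py | __DeonYuli_MinusA
-- ===== SOURCE A (Python) =====
-- def __DeonYuli_MinusA(a):
--     if a < 1:
--         a = 1
--         return a
--     z = 1
--     for i in range(3):
--         if a % 4 != 0:
--             a -= 1
--         else:
--             break
--     a += 1
--     if a > z:
--         a -= 4
--     return a
-- ===== SOURCE B (Python) =====
-- def __DeonYuli_MinusA(a):
--     if a < 1:
--         return 1
--     m = a - a % 4  # largest multiple of 4 not exceeding a
--     return m - 3 if m > 0 else 1
-- ===== Notes on version B (the rewrite author's own statement) =====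
-- stated objective: simpler
-- what changed: Replaced the bounded decrement loop (up to 3 subtractions until a multiple of 4, then +1 and conditional -4) with a closed form: round a down to a multiple of 4 via a - a % 4 and subtract 3, returning 1 for a < 4.
import Mathlib
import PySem

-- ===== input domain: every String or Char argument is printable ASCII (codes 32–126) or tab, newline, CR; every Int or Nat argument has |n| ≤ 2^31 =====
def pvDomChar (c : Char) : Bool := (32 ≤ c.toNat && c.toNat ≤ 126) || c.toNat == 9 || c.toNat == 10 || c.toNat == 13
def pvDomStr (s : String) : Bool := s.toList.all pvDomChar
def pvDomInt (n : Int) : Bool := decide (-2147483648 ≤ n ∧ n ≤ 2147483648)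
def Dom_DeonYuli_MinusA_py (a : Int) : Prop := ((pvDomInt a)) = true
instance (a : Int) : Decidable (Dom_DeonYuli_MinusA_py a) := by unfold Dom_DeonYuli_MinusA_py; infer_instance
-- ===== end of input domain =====

-- ===== PORT A =====
-- B replaces A's bounded decrement loop by the closed form a - a % 4 (round down to a multiple of 4), for simplicity.
def DeonYuli_MinusA_py (a : Int) : Int :=
  if a < 1 then 1
  else
    -- for i in range(3): if a % 4 != 0: a -= 1 else: break
    -- state: (current a, broken?)
    let st := (List.range 3).foldl
      (fun (st : Int × Bool) _ =>
        if st.2 then st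
        else if PySem.Int.mod st.1 4 ≠ 0 then (st.1 - 1, false)
        else (st.1, true)) (a, false)
    let a := st.1 + 1
    if a > 1 then a - 4 else a

-- ===== PORT B =====
def DeonYuli_MinusA_py_alt (a : Int) : Int :=
  if a < 1 then 1
  else
    let m := a - PySem.Int.mod a 4
    if m > 0 then m - 3 else 1

-- ===== PRECONDITION & SPEC =====
def Spec_DeonYuli_MinusA_py (a : Int) (out : Int) : Prop := out = DeonYuli_MinusA_py_alt a
instance (a : Int) (out : Int) : Decidable (Spec_DeonYuli_MinusA_py a out) := by unfold Spec_DeonYuli_MinusA_py; infer_instance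

-- ===== CLAIM (what is proved, stated in full; the proofs are below) =====
def Claim_equal_DeonYuli_MinusA_py : Prop := ∀ (a : Int), Dom_DeonYuli_MinusA_py a → Spec_DeonYuli_MinusA_py a (DeonYuli_MinusA_py a)

-- ===== LEMMAS AND PROOFS =====

-- ===== VERDICT (by name: the statement is the Claim_ definition above) =====
theorem DeonYuli_MinusA_py_spec : Claim_equal_DeonYuli_MinusA_py := by
  intro a _
  unfold Spec_DeonYuli_MinusA_py DeonYuli_MinusA_py DeonYuli_MinusA_py_alt
  by_cases h : a < 1
  · simp [h]
  · have hpos : (0:Int) < 4 := by omega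
    have hm : PySem.Int.mod a 4 = a % 4 := PySem.Int.mod_eq_emod_of_pos hpos
    have hm1 : PySem.Int.mod (a - 1) 4 = (a - 1) % 4 := PySem.Int.mod_eq_emod_of_pos hpos
    have hm2 : PySem.Int.mod (a - 1 - 1) 4 = (a - 1 - 1) % 4 := PySem.Int.mod_eq_emod_of_pos hpos
    have h4 : a % 4 = 0 ∨ a % 4 = 1 ∨ a % 4 = 2 ∨ a % 4 = 3 := by omega
    have hr : List.range 3 = [0, 1, 2] := rfl
    rw [hr]
    simp only [List.foldl, if_neg h, hm]
    rcases h4 with h0 | h0 | h0 | h0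
    · simp [h0]; omega
    · have e1 : (a - 1) % 4 = 0 := by omega
      simp [h0, hm1, e1]; omega
    · have e1 : (a - 1) % 4 = 1 := by omega
      have e2 : (a - 1 - 1) % 4 = 0 := by omega
      simp [h0, hm1, e1, hm2, e2]; omega
    · have e1 : (a - 1) % 4 = 2 := by omega
      have e2 : (a - 1 - 1) % 4 = 1 := by omega
      simp [h0, hm1, e1, hm2, e2]; split_ifs <;> omega
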